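-- pv_equiv track=rewrite | github.com/Ashiq-am/Data-Structures-Algorithm | 1.Python Algorithms/4.Graph Algoithms/7.Connectivity/25.Find if an array of strings can be chained to form a circle  Set 2/program.py | possibleOrderAmongString
-- ===== SOURCE A (Python) =====
-- M = 26
--
-- def dfs(g, u, visit):
--     visit[u] = True
--
--     for i in range(len(g[u])):
--         if (not visit[g[u][i]]):
--             dfs(g, g[u][i], visit)
--
-- def isConnected(g, mark, s):
--     # Initialize all vertices
--     # as not visited
--     visit = [False for i in range(M)]
--
--     # Perform a dfs from s
--     dfs(g, s, visit)
--
--     # Now loop through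
--     # all characters
--     for i in range(M):
--
--         # I character is marked
--         # (i.e. it was first or last
--         # character of some string)
--         # then it should be visited
--         # in last dfs (as for looping,
--         # graph should be strongly
--         # connected) */
--         if (mark[i] and (not visit[i])):
--             return False
--
--     # If we reach that means
--     # graph is connected
--     return True
--
-- def possibleOrderAmongString(arr, N):
--     # Create an empty graph
--     g = {}
--
--     # Initialize all vertices
--     # as not marked
--     mark = [False for i in range(M)]
--
--     # Initialize indegree and
--     # outdegree of every
--     # vertex as 0.
--     In = [0 for i in range(M)]
--     out = [0 for i in range(M)]
--
--     # Process all strings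
--     # one by one
--     for i in range(N):
--
--         # Find first and last
--         # characters
--         f = (ord(arr[i][0]) -
--              ord('a'))
--         l = (ord(arr[i][-1]) -
--              ord('a'))
--
--         # Mark the characters
--         mark[f] = True
--         mark[l] = True
--
--         # Increase indegree
--         # and outdegree count
--         In[l] += 1
--         out[f] += 1
--
--         if f not in g:
--             g[f] = []
--
--         # Add an edge in graph
--         g[f].append(l)
--
--     # If for any character
--     # indegree is not equal to
--     # outdegree then ordering
--     # is not possible
--     for i in range(M):
--         if (In[i] != out[i]):
--             return False
--
--     return isConnected(g, mark,
--                        ord(arr[0][0]) - ord('a'))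
-- ===== SOURCE B (Python) =====
-- M = 26
--
-- def possibleOrderAmongString(arr, N):
--     # collect edges (first letter -> last letter), marks, and in-minus-out degree
--     edges = []
--     mark = [False] * M
--     deg = [0] * M
--     for i in range(N):
--         f = ord(arr[i][0]) - ord('a')
--         l = ord(arr[i][-1]) - ord('a')
--         mark[f] = True
--         mark[l] = True
--         deg[l] += 1
--         deg[f] -= 1
--         edges.append((f, l))
--     # every letter must have equal in- and out-degree
--     if any(deg):
--         return False
--     # reachability from the start letter by edge-list relaxation (fixpoint)
--     reach = [False] * M
--     reach[edges[0][0]] = True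
--     for _ in range(M):
--         for f, l in edges:
--             if reach[f] and not reach[l]:
--                 reach[l] = True
--     return all(reach[i] or not mark[i] for i in range(M))
-- ===== Notes on version B (the rewrite author's own statement) =====
-- stated objective: simpler
-- what changed: The recursive DFS over an adjacency dict (plus separate in/out arrays) is replaced by a single in-minus-out degree array and an iterative edge-list relaxation fixpoint for reachability, so B needs no recursion and no dict.
-- outside the precondition, e.g. on possibleOrderAmongString(['Za', 'ab', 'bt', 'tc', 'cZ'], 5): A returns False, B returns True
import Mathlib
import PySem

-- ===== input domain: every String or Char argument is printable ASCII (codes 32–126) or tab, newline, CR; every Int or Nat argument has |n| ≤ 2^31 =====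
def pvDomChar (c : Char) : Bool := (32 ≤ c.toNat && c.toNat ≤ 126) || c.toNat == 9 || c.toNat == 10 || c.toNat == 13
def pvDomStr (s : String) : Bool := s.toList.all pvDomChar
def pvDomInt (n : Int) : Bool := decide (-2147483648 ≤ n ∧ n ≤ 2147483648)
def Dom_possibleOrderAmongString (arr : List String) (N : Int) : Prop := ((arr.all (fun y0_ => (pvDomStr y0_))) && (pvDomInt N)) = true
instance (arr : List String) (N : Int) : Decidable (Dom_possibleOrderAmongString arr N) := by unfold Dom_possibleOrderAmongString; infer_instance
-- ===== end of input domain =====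

-- B replaces A's recursive DFS over an adjacency dict (plus separate in/out degree arrays) by a
-- single in-minus-out degree array and an iterative edge-list relaxation fixpoint: simpler, no
-- recursion and no dict.  Equivalence is proved on Pre_ (lowercase first/last letters).

-- ===== PORT A =====
-- shared index helper: ord(s[j]) - ord('a'); the 'getD' default is never used under Pre_,
-- where the string is nonempty so the character exists
def pvIdxF (s : String) : Int := (((PySem.Str.pyGet? s 0).getD ' ').toNat : Int) - 97
def pvIdxL (s : String) : Int := (((PySem.Str.pyGet? s (-1)).getD ' ').toNat : Int) - 97

-- one iteration of A's string loop: mark f,l; In[l]+=1; out[f]+=1; dict edge append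
def pvStepA (st : PySem.Dict Int (List Int) × List Bool × List Int × List Int) (s : String) :
    PySem.Dict Int (List Int) × List Bool × List Int × List Int :=
  let f := pvIdxF s
  let l := pvIdxL s
  let mark := PySem.List.pySetD (PySem.List.pySetD st.2.1 f true) l true
  let inD := PySem.List.pySetD st.2.2.1 l (PySem.List.pyGetD st.2.2.1 l 0 + 1)
  let outD := PySem.List.pySetD st.2.2.2 f (PySem.List.pyGetD st.2.2.2 f 0 + 1)
  let g := if st.1.contains f then st.1 else st.1.insert f []
  (g.modify f [] (fun xs => xs ++ [l]), mark, inD, outD)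

-- Python's recursive dfs; fuel 26 is an upper bound on the nesting depth (each nested call marks a
-- previously unmarked one of the 26 vertices), so it is exact under Pre_; likewise 'getD u []' is
-- exact under Pre_, where dfs only reaches keys of the dict (degrees are balanced when it is called)
-- the inner 'for' loop of dfs: fold over the adjacency list, recursing on unvisited vertices
def pvDfsGo (step : Int → List Bool → List Bool) : List Int → List Bool → List Bool
  | [], visit => visit
  | v :: rest, visit =>
      pvDfsGo step rest (if PySem.List.pyGetD visit v false then visit else step v visit)

def pvDfs (g : PySem.Dict Int (List Int)) : Nat → Int → List Bool → List Bool
  | 0, _, visit => visit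
  | fuel+1, u, visit =>
      pvDfsGo (fun v vis => pvDfs g fuel v vis) (g.getD u []) (PySem.List.pySetD visit u true)

def pvIsConnected (g : PySem.Dict Int (List Int)) (mark : List Bool) (s : Int) : Bool :=
  let visit := pvDfs g 26 s (List.replicate 26 false)
  (PySem.List.pyRange 0 26 1).all (fun i =>
    !(PySem.List.pyGetD mark i false && !(PySem.List.pyGetD visit i false)))

def possibleOrderAmongString (arr : List String) (N : Int) : Bool :=
  let st := (PySem.List.pyRange 0 N 1).foldl
    (fun st i => pvStepA st (PySem.List.pyGetD arr i ""))
    (PySem.Dict.empty, List.replicate 26 false, List.replicate 26 0, List.replicate 26 0)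
  if (PySem.List.pyRange 0 26 1).all
      (fun i => PySem.List.pyGetD st.2.2.1 i 0 == PySem.List.pyGetD st.2.2.2 i 0)
  then pvIsConnected st.1 st.2.1 (pvIdxF (PySem.List.pyGetD arr 0 ""))
  else false

-- ===== PORT B =====
-- one iteration of B's string loop: append edge; mark f,l; deg[l]+=1; deg[f]-=1
def pvStepB (st : List (Int × Int) × List Bool × List Int) (s : String) :
    List (Int × Int) × List Bool × List Int :=
  let f := pvIdxF s
  let l := pvIdxL s
  let deg := PySem.List.pySetD st.2.2 l (PySem.List.pyGetD st.2.2 l 0 + 1)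
  (st.1 ++ [(f, l)],
   PySem.List.pySetD (PySem.List.pySetD st.2.1 f true) l true,
   PySem.List.pySetD deg f (PySem.List.pyGetD deg f 0 - 1))

-- one edge relaxation: if reach[f] and not reach[l]: reach[l] = True
def pvRelax (r : List Bool) (e : Int × Int) : List Bool :=
  if PySem.List.pyGetD r e.1 false && !(PySem.List.pyGetD r e.2 false)
  then PySem.List.pySetD r e.2 true else r

def possibleOrderAmongString_alt (arr : List String) (N : Int) : Bool :=
  let st := (PySem.List.pyRange 0 N 1).foldl
    (fun st i => pvStepB st (PySem.List.pyGetD arr i ""))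
    ([], List.replicate 26 false, List.replicate 26 0)
  if st.2.2.any (fun x => x != 0) then false
  else
    -- reach[edges[0][0]] = True; the getD default is never used under Pre_ (N ≥ 1, so edges ≠ [])
    let r0 := PySem.List.pySetD (List.replicate 26 false) (PySem.List.pyGetD st.1 0 ((0:Int), (0:Int))).1 true
    let reach := (PySem.List.pyRange 0 26 1).foldl (fun r _ => st.1.foldl pvRelax r) r0
    (PySem.List.pyRange 0 26 1).all (fun i =>
      PySem.List.pyGetD reach i false || !(PySem.List.pyGetD st.2.1 i false))

-- ===== PRECONDITION & SPEC =====
def pvLowerC (c : Char) : Prop := 97 ≤ c.toNat ∧ c.toNat ≤ 122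

-- Pre_ keeps 1 ≤ N ≤ len(arr) with the first N strings nonempty and lowercase at both ends — the
-- function's intended alphabet.  Outside it A raises IndexError/KeyError, except for non-lowercase
-- first/last characters with code 71–122, where A returns values produced by accidental negative
-- Python list-index wraparound that aliases distinct characters onto the 26 letter slots.
def Pre_possibleOrderAmongString (arr : List String) (N : Int) : Prop :=
  1 ≤ N ∧ N ≤ arr.length ∧
  ∀ s ∈ arr.take N.toNat, s.toList ≠ [] ∧
    pvLowerC ((s.toList[0]?).getD ' ') ∧ pvLowerC ((s.toList.getLast?).getD ' ')
instance (arr : List String) (N : Int) : Decidable (Pre_possibleOrderAmongString arr N) := by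
  unfold Pre_possibleOrderAmongString pvLowerC; infer_instance

def pvWitness_possibleOrderAmongString : List String × Int := (["ab", "ba"], 2)

def Spec_possibleOrderAmongString (arr : List String) (N : Int) (out : Bool) : Prop := out = possibleOrderAmongString_alt arr N
instance (arr : List String) (N : Int) (out : Bool) : Decidable (Spec_possibleOrderAmongString arr N out) := by unfold Spec_possibleOrderAmongString; infer_instance

-- ===== CLAIM (what is proved, stated in full; the proofs are below) =====
def Claim_equal_possibleOrderAmongString : Prop := ∀ (arr : List String) (N : Int), Dom_possibleOrderAmongString arr N → Pre_possibleOrderAmongString arr N → Spec_possibleOrderAmongString arr N (possibleOrderAmongString arr N)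

-- ===== LEMMAS AND PROOFS =====

-- ---------- generic small lemmas ----------

theorem pv_all_congr_mem {α : Type} (l : List α) (p q : α → Bool)
    (h : ∀ x ∈ l, p x = q x) : l.all p = l.all q := by
  induction l with
  | nil => rfl
  | cons x xs ih =>
    simp only [List.all_cons, h x (by simp), ih (fun y hy => h y (by simp [hy]))]

-- ---------- proof-side abbreviations ----------

def pvG (r : List Bool) (i : Int) : Bool := PySem.List.pyGetD r i false
def pvInR (i : Int) : Prop := 0 ≤ i ∧ i < 26
def pvRel (E : List (Int × Int)) (a b : Int) : Prop := (a, b) ∈ E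
def pvReach (E : List (Int × Int)) (s t : Int) : Prop := Relation.ReflTransGen (pvRel E) s t
def pvMono (r r' : List Bool) : Prop := ∀ j, pvInR j → pvG r j = true → pvG r' j = true
def pvClosedL (E : List (Int × Int)) (r : List Bool) : Prop :=
  ∀ e ∈ E, pvG r e.1 = true → pvG r e.2 = true
def pvClosedNew (E : List (Int × Int)) (vis res : List Bool) : Prop :=
  ∀ x, pvInR x → pvG res x = true → pvG vis x = false → ∀ y, pvRel E x y → pvG res y = true
def pvER (E : List (Int × Int)) : Prop := ∀ a b, pvRel E a b → pvInR a ∧ pvInR b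

-- ---------- getD / pySetD pointwise lemmas ----------

theorem pv_getD_set_self (l : List Bool) (n : Nat) (b : Bool) (h : n < l.length) :
    (l.set n b).getD n false = b := by
  simp [List.getD_eq_getElem?_getD, List.getElem?_set_self h]

theorem pv_getD_set_ne (l : List Bool) (n m : Nat) (b : Bool) (h : n ≠ m) :
    (l.set n b).getD m false = l.getD m false := by
  simp [List.getD_eq_getElem?_getD, List.getElem?_set_ne h]

theorem pvG_set_self (r : List Bool) (i : Int) (b : Bool) (hlen : r.length = 26) (hi : pvInR i) :
    pvG (PySem.List.pySetD r i b) i = b := by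
  obtain ⟨h0, h26⟩ := hi
  rw [pvG, PySem.List.pySetD_of_nonneg _ _ h0, PySem.List.pyGetD_of_nonneg _ _ h0]
  exact pv_getD_set_self _ _ _ (by rw [hlen]; exact (Int.toNat_lt' (by norm_num)).2 h26)

theorem pvG_set_ne (r : List Bool) (i j : Int) (b : Bool) (hi : 0 ≤ i) (hj : 0 ≤ j) (hne : j ≠ i) :
    pvG (PySem.List.pySetD r i b) j = pvG r j := by
  rw [pvG, pvG, PySem.List.pySetD_of_nonneg _ _ hi, PySem.List.pyGetD_of_nonneg _ _ hj,
    PySem.List.pyGetD_of_nonneg _ _ hj]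
  exact pv_getD_set_ne _ _ _ _ (fun hc => hne (by omega))

theorem pvG_natCast (r : List Bool) (k : Nat) : pvG r (k : Int) = r.getD k false := by
  simp [pvG, PySem.List.pyGetD_natCast]

theorem pvMono_set_true (r : List Bool) (i : Int) (hlen : r.length = 26) (hi : pvInR i) :
    pvMono r (PySem.List.pySetD r i true) := by
  intro j hj htrue
  by_cases hji : j = i
  · subst hji; exact pvG_set_self r j true hlen hj
  · rw [pvG_set_ne r i j true hi.1 hj.1 hji]; exact htrue

theorem pvG_replicate (i : Int) : pvG (List.replicate 26 false) i = false := by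
  unfold pvG
  cases h : PySem.List.pyGet? (List.replicate 26 false) i with
  | none => exact PySem.List.pyGetD_of_none _ _ _ h
  | some x =>
    have hx := PySem.List.mem_of_pyGet?_eq_some _ h
    have : x = false := List.eq_of_mem_replicate hx
    rw [PySem.List.pyGetD, h]; simpa using this

-- ---------- counting lemmas ----------

theorem pv_count_lemma : ∀ (xs ys : List Bool), xs.length = ys.length →
    (∀ k, k < xs.length → xs.getD k false = true → ys.getD k false = true) →
    ys.count false ≤ xs.count false ∧ xs.count true ≤ ys.count true ∧
      ((∃ k, k < xs.length ∧ ys.getD k false = true ∧ xs.getD k false = false) →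
        xs.count true < ys.count true) := by
  intro xs
  induction xs with
  | nil =>
    intro ys hlen _; cases ys with
    | nil => simp
    | cons y ys => simp at hlen
  | cons x xs ih =>
    intro ys hlen hpt
    cases ys with
    | nil => simp at hlen
    | cons y ys =>
      have hlen' : xs.length = ys.length := by simpa using hlen
      have hpt0 : x = true → y = true := by
        have := hpt 0 (by simp)
        simpa using this
      have hpt' : ∀ k, k < xs.length → xs.getD k false = true → ys.getD k false = true := by
        intro k hk h
        have := hpt (k+1) (by simpa using Nat.succ_lt_succ hk)
        simpa using this h
      obtain ⟨c1, c2, c3⟩ := ih ys hlen' hpt'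
      have ef : ∀ (z : Bool) (l : List Bool),
          (z :: l).count false = l.count false + (if z = false then 1 else 0) := by
        intro z l; simp [List.count_cons]
      have et : ∀ (z : Bool) (l : List Bool),
          (z :: l).count true = l.count true + (if z = true then 1 else 0) := by
        intro z l; simp [List.count_cons]
      refine ⟨?_, ?_, ?_⟩
      · rw [ef, ef]
        cases x <;> cases y
        · simp; omega
        · simp; omega
        · exact absurd (hpt0 rfl) (by simp)
        · simp; omega
      · rw [et, et]
        cases x <;> cases y
        · simp; omega
        · simp; omega
        · exact absurd (hpt0 rfl) (by simp)
        · simp; omega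
      · rintro ⟨k, hk, hy, hx⟩
        rw [et, et]
        cases k with
        | zero =>
          have hx0 : x = false := by simpa using hx
          have hy0 : y = true := by simpa using hy
          subst hx0; subst hy0
          simp; omega
        | succ k =>
          have hk' : k < xs.length := by simpa using Nat.lt_of_succ_lt_succ hk
          have hlt := c3 ⟨k, hk', by simpa using hy, by simpa using hx⟩
          cases x <;> cases y
          · simp; omega
          · simp; omega
          · exact absurd (hpt0 rfl) (by simp)
          · simp; omega

theorem pv_countFalse_mono (r r' : List Bool) (h1 : r.length = 26) (h2 : r'.length = 26)
    (h : pvMono r r') : r'.count false ≤ r.count false := by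
  have := pv_count_lemma r r' (by omega) ?_
  · exact this.1
  · intro k hk ht
    have hkr : k < 26 := by omega
    have := h (k : Int) ⟨by positivity, by exact_mod_cast hkr⟩
    rw [pvG_natCast, pvG_natCast] at this
    exact this ht

theorem pv_countTrue_strict (r r' : List Bool) (h1 : r.length = 26) (h2 : r'.length = 26)
    (h : pvMono r r') (hne : ¬ pvMono r' r) : r.count true < r'.count true := by
  have hptm : ∀ k, k < r.length → r.getD k false = true → r'.getD k false = true := by
    intro k hk ht
    have hkr : k < 26 := by omega
    have := h (k : Int) ⟨by positivity, by exact_mod_cast hkr⟩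
    rw [pvG_natCast, pvG_natCast] at this
    exact this ht
  obtain ⟨c1, c2, c3⟩ := pv_count_lemma r r' (by omega) hptm
  apply c3
  unfold pvMono at hne
  push_neg at hne
  obtain ⟨j, hj, hjt, hjf⟩ := hne
  refine ⟨j.toNat, ?_, ?_, ?_⟩
  · rw [h1]; exact (Int.toNat_lt' (by norm_num)).2 hj.2
  · rw [← pvG_natCast, Int.toNat_of_nonneg hj.1]; exact hjt
  · rw [← pvG_natCast, Int.toNat_of_nonneg hj.1]
    simpa using hjf

theorem pv_countFalse_set (r : List Bool) (i : Int) (hlen : r.length = 26) (hi : pvInR i)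
    (hf : pvG r i = false) :
    (PySem.List.pySetD r i true).count false < r.count false := by
  obtain ⟨h0, h26⟩ := hi
  have hidx : i.toNat < r.length := by rw [hlen]; exact (Int.toNat_lt' (by norm_num)).2 h26
  rw [PySem.List.pySetD_of_nonneg _ _ h0]
  rw [pvG, PySem.List.pyGetD_of_nonneg _ _ h0] at hf
  have hget : r[i.toNat] = false := by
    rw [List.getD_eq_getElem _ _ hidx] at hf; exact hf
  have := List.count_set (a := true) (b := false) (l := r) (i := i.toNat) hidx
  rw [hget] at this
  have hpos : 0 < r.count false := by
    rw [List.count_pos_iff]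
    exact hget ▸ List.getElem_mem hidx
  norm_num at this
  omega

theorem pv_countFalse_pos (r : List Bool) (i : Int) (hlen : r.length = 26) (hi : pvInR i)
    (hf : pvG r i = false) : 1 ≤ r.count false := by
  obtain ⟨h0, h26⟩ := hi
  have hidx : i.toNat < r.length := by rw [hlen]; exact (Int.toNat_lt' (by norm_num)).2 h26
  rw [pvG, PySem.List.pyGetD_of_nonneg _ _ h0] at hf
  have hget : r[i.toNat] = false := by
    rw [List.getD_eq_getElem _ _ hidx] at hf; exact hf
  have : (false : Bool) ∈ r := hget ▸ List.getElem_mem hidx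
  have := List.count_pos_iff.2 this
  omega

theorem pv_countTrue_pos (r : List Bool) (i : Int) (hlen : r.length = 26) (hi : pvInR i)
    (hf : pvG r i = true) : 1 ≤ r.count true := by
  obtain ⟨h0, h26⟩ := hi
  have hidx : i.toNat < r.length := by rw [hlen]; exact (Int.toNat_lt' (by norm_num)).2 h26
  rw [pvG, PySem.List.pyGetD_of_nonneg _ _ h0] at hf
  have hget : r[i.toNat] = true := by
    rw [List.getD_eq_getElem _ _ hidx] at hf; exact hf
  have : (true : Bool) ∈ r := hget ▸ List.getElem_mem hidx
  have := List.count_pos_iff.2 this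
  omega

-- ---------- A side: dfs lemmas ----------

theorem pvMono_refl (r : List Bool) : pvMono r r := fun _ _ h => h

theorem pvMono_trans {r1 r2 r3 : List Bool} (h1 : pvMono r1 r2) (h2 : pvMono r2 r3) :
    pvMono r1 r3 := fun j hj h => h2 j hj (h1 j hj h)

theorem pv_go_length (step : Int → List Bool → List Bool)
    (hstep : ∀ v vis, (step v vis).length = vis.length) :
    ∀ lst visit, (pvDfsGo step lst visit).length = visit.length := by
  intro lst
  induction lst with
  | nil => intro visit; rfl
  | cons v rest ih =>
    intro visit
    show (pvDfsGo step rest _).length = _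
    rw [ih]
    split
    · rfl
    · exact hstep v visit

theorem pv_dfs_length (g : PySem.Dict Int (List Int)) :
    ∀ fuel u visit, (pvDfs g fuel u visit).length = visit.length := by
  intro fuel
  induction fuel with
  | zero => intro u visit; rfl
  | succ fuel ih =>
    intro u visit
    show (pvDfsGo _ _ _).length = _
    rw [pv_go_length _ (fun v vis => ih v vis)]
    exact PySem.List.length_pySetD _ _ _

theorem pv_go_mono (step : Int → List Bool → List Bool)
    (hlen : ∀ v vis, (step v vis).length = vis.length)
    (hstep : ∀ v vis, vis.length = 26 → pvInR v → pvMono vis (step v vis)) :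
    ∀ lst, (∀ v ∈ lst, pvInR v) → ∀ visit, visit.length = 26 →
      pvMono visit (pvDfsGo step lst visit) := by
  intro lst
  induction lst with
  | nil => intro _ visit _; exact pvMono_refl visit
  | cons v rest ih =>
    intro hgood visit h26
    show pvMono visit (pvDfsGo step rest _)
    have hv : pvInR v := hgood v (by simp)
    by_cases hvis : PySem.List.pyGetD visit v false = true
    · simp only [hvis, if_true]
      exact ih (fun w hw => hgood w (by simp [hw])) visit h26
    · simp only [hvis, if_false, Bool.false_eq_true]
      refine pvMono_trans (hstep v visit h26 hv) ?_
      exact ih (fun w hw => hgood w (by simp [hw])) (step v visit) (by rw [hlen]; exact h26)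

theorem pv_dfs_mono (g : PySem.Dict Int (List Int))
    (hgood : ∀ a, ∀ v ∈ g.getD a [], pvInR v) :
    ∀ fuel u visit, visit.length = 26 → pvInR u →
      pvMono visit (pvDfs g fuel u visit) := by
  intro fuel
  induction fuel with
  | zero => intro u visit _ _; exact pvMono_refl visit
  | succ fuel ih =>
    intro u visit h26 hu
    show pvMono visit (pvDfsGo _ _ _)
    refine pvMono_trans (pvMono_set_true visit u h26 hu) ?_
    exact pv_go_mono _ (fun v vis => pv_dfs_length g fuel v vis)
      (fun v vis hl hv => ih v vis hl hv) _ (hgood u) _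
      (by rw [PySem.List.length_pySetD]; exact h26)

theorem pv_dfs_marks (g : PySem.Dict Int (List Int))
    (hgood : ∀ a, ∀ v ∈ g.getD a [], pvInR v) :
    ∀ fuel u visit, visit.length = 26 → pvInR u → 1 ≤ fuel →
      pvG (pvDfs g fuel u visit) u = true := by
  intro fuel
  cases fuel with
  | zero => intro u visit _ _ h; omega
  | succ fuel =>
    intro u visit h26 hu _
    show pvG (pvDfsGo _ _ _) u = true
    have h1 : pvG (PySem.List.pySetD visit u true) u = true := pvG_set_self visit u true h26 hu
    exact pv_go_mono _ (fun v vis => pv_dfs_length g fuel v vis)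
      (fun v vis hl hv => pv_dfs_mono g hgood fuel v vis hl hv) _ (hgood u) _
      (by rw [PySem.List.length_pySetD]; exact h26) u hu h1

theorem pv_go_marks (g : PySem.Dict Int (List Int))
    (hgood : ∀ a, ∀ v ∈ g.getD a [], pvInR v) (fuel : Nat) :
    ∀ lst, (∀ v ∈ lst, pvInR v) → ∀ visit, visit.length = 26 → visit.count false ≤ fuel →
      ∀ v ∈ lst, pvG (pvDfsGo (fun v vis => pvDfs g fuel v vis) lst visit) v = true := by
  intro lst
  induction lst with
  | nil => intro _ _ _ _ v hv; simp at hv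
  | cons w rest ih =>
    intro hg visit h26 hcnt v hv
    have hw : pvInR w := hg w (by simp)
    show pvG (pvDfsGo _ rest (if PySem.List.pyGetD visit w false = true then visit
        else pvDfs g fuel w visit)) v = true
    set st' := (if PySem.List.pyGetD visit w false = true then visit
        else pvDfs g fuel w visit) with hst'
    have hlen' : st'.length = 26 := by
      rw [hst']; split
      · exact h26
      · rw [pv_dfs_length]; exact h26
    have hmono' : pvMono visit st' := by
      rw [hst']; split
      · exact pvMono_refl visit
      · exact pv_dfs_mono g hgood fuel w visit h26 hw
    have hcnt' : st'.count false ≤ fuel :=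
      le_trans (pv_countFalse_mono visit st' h26 hlen' hmono') hcnt
    rcases List.mem_cons.1 hv with hv | hv
    · subst hv
      have hm : pvG st' v = true := by
        rw [hst']
        by_cases hvis : PySem.List.pyGetD visit v false = true
        · simp only [hvis, if_true]; exact hvis
        · simp only [hvis, if_false, Bool.false_eq_true]
          have hc1 : 1 ≤ visit.count false :=
            pv_countFalse_pos visit v h26 (hg v (by simp)) (by simpa using hvis)
          exact pv_dfs_marks g hgood fuel v visit h26 (hg v (by simp)) (by omega)
      exact pv_go_mono _ (fun a vis => pv_dfs_length g fuel a vis)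
        (fun a vis hl ha => pv_dfs_mono g hgood fuel a vis hl ha) rest
        (fun a ha => hg a (by simp [ha])) st' hlen' v hw hm
    · exact ih (fun a ha => hg a (by simp [ha])) st' hlen' hcnt' v hv

theorem pv_go_sound (E : List (Int × Int)) (step : Int → List Bool → List Bool)
    (hslen : ∀ v vis, (step v vis).length = vis.length)
    (hs : ∀ v vis j, vis.length = 26 → pvInR v → pvInR j →
      pvG (step v vis) j = true → pvG vis j = true ∨ pvReach E v j) :
    ∀ lst, (∀ v ∈ lst, pvInR v) → ∀ visit, visit.length = 26 → ∀ j, pvInR j →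
      pvG (pvDfsGo step lst visit) j = true →
      pvG visit j = true ∨ ∃ v ∈ lst, pvReach E v j := by
  intro lst
  induction lst with
  | nil => intro _ visit _ j _ h; exact Or.inl h
  | cons v rest ih =>
    intro hg visit h26 j hj h
    have hv : pvInR v := hg v (by simp)
    rw [show pvDfsGo step (v :: rest) visit = pvDfsGo step rest
        (if PySem.List.pyGetD visit v false = true then visit else step v visit) from rfl] at h
    set st' := (if PySem.List.pyGetD visit v false = true then visit else step v visit) with hst'
    have hlen' : st'.length = 26 := by
      rw [hst']; split
      · exact h26
      · rw [hslen]; exact h26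
    rcases ih (fun a ha => hg a (by simp [ha])) st' hlen' j hj h with h1 | ⟨w, hw, hr⟩
    · rw [hst'] at h1
      by_cases hvis : PySem.List.pyGetD visit v false = true
      · rw [if_pos hvis] at h1; exact Or.inl h1
      · rw [if_neg hvis] at h1
        rcases hs v visit j h26 hv hj h1 with h2 | h2
        · exact Or.inl h2
        · exact Or.inr ⟨v, by simp, h2⟩
    · exact Or.inr ⟨w, by simp [hw], hr⟩

theorem pv_dfs_sound (g : PySem.Dict Int (List Int)) (E : List (Int × Int))
    (hadj : ∀ a b, b ∈ g.getD a [] ↔ pvRel E a b) (hER : pvER E) :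
    ∀ fuel u visit j, visit.length = 26 → pvInR u → pvInR j →
      pvG (pvDfs g fuel u visit) j = true → pvG visit j = true ∨ pvReach E u j := by
  have hgood : ∀ a, ∀ v ∈ g.getD a [], pvInR v := by
    intro a v hv; exact (hER a v ((hadj a v).1 hv)).2
  intro fuel
  induction fuel with
  | zero => intro u visit j _ _ _ h; exact Or.inl h
  | succ fuel ih =>
    intro u visit j h26 hu hj h
    rcases pv_go_sound E _ (fun v vis => pv_dfs_length g fuel v vis)
        (fun v vis j hl hv hj hh => ih v vis j hl hv hj hh)
        _ (hgood u) _ (by rw [PySem.List.length_pySetD]; exact h26) j hj h with h1 | ⟨v, hv, hr⟩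
    · by_cases hju : j = u
      · subst hju; exact Or.inr Relation.ReflTransGen.refl
      · rw [pvG_set_ne visit u j true hu.1 hj.1 hju] at h1; exact Or.inl h1
    · exact Or.inr (Relation.ReflTransGen.head ((hadj u v).1 hv) hr)

theorem pv_go_closednew (E : List (Int × Int)) (hER : pvER E) (fuel : Nat)
    (step : Int → List Bool → List Bool)
    (hslen : ∀ v vis, (step v vis).length = vis.length)
    (hsmono : ∀ v vis, vis.length = 26 → pvInR v → pvMono vis (step v vis))
    (hsclosed : ∀ v vis, vis.length = 26 → pvInR v → pvG vis v = false →
      vis.count false ≤ fuel → pvClosedNew E vis (step v vis)) :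
    ∀ lst, (∀ v ∈ lst, pvInR v) → ∀ visit, visit.length = 26 → visit.count false ≤ fuel →
      pvClosedNew E visit (pvDfsGo step lst visit) := by
  intro lst
  induction lst with
  | nil =>
    intro _ visit _ _ x _ hx hx' _ _
    rw [show pvDfsGo step [] visit = visit from rfl] at hx
    rw [hx] at hx'; cases hx'
  | cons v rest ih =>
    intro hg visit h26 hcnt x hxR hresx hxold y hrel
    have hv : pvInR v := hg v (by simp)
    show pvG (pvDfsGo step rest _) y = true
    set st' := (if PySem.List.pyGetD visit v false = true then visit else step v visit) with hst'
    have hlen' : st'.length = 26 := by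
      rw [hst']; split
      · exact h26
      · rw [hslen]; exact h26
    have hmono' : pvMono visit st' := by
      rw [hst']; split
      · exact pvMono_refl visit
      · exact hsmono v visit h26 hv
    have hcnt' : st'.count false ≤ fuel :=
      le_trans (pv_countFalse_mono visit st' h26 hlen' hmono') hcnt
    have hyR : pvInR y := (hER x y hrel).2
    have hresx' : pvG (pvDfsGo step rest st') x = true := hresx
    by_cases hstx : pvG st' x = true
    · have hvnf : PySem.List.pyGetD visit v false ≠ true := by
        intro hvis
        rw [hst', if_pos hvis] at hstx
        rw [hstx] at hxold; cases hxold
      have hstep : st' = step v visit := by rw [hst', if_neg hvnf]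
      have hcl : pvClosedNew E visit st' := by
        rw [hstep]
        exact hsclosed v visit h26 hv (by simpa using hvnf) hcnt
      have hy : pvG st' y = true := hcl x hxR hstx hxold y hrel
      exact pv_go_mono step hslen hsmono rest (fun a ha => hg a (by simp [ha])) st' hlen'
        y hyR hy
    · exact ih (fun a ha => hg a (by simp [ha])) st' hlen' hcnt' x hxR hresx'
        (by simpa using hstx) y hrel

theorem pv_dfs_closednew (g : PySem.Dict Int (List Int)) (E : List (Int × Int))
    (hadj : ∀ a b, b ∈ g.getD a [] ↔ pvRel E a b) (hER : pvER E) :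
    ∀ fuel u visit, visit.length = 26 → pvInR u → pvG visit u = false →
      visit.count false ≤ fuel → pvClosedNew E visit (pvDfs g fuel u visit) := by
  have hgood : ∀ a, ∀ v ∈ g.getD a [], pvInR v := by
    intro a v hv; exact (hER a v ((hadj a v).1 hv)).2
  intro fuel
  induction fuel with
  | zero =>
    intro u visit h26 hu huf hcnt
    have := pv_countFalse_pos visit u h26 hu huf
    omega
  | succ fuel ih =>
    intro u visit h26 hu huf hcnt
    intro x hxR hresx hxold y hrel
    have hlen1 : (PySem.List.pySetD visit u true).length = 26 := by
      rw [PySem.List.length_pySetD]; exact h26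
    have hcnt1 : (PySem.List.pySetD visit u true).count false ≤ fuel := by
      have := pv_countFalse_set visit u h26 hu huf
      omega
    by_cases hxu : x = u
    · subst hxu
      have hy : y ∈ g.getD x [] := (hadj x y).2 hrel
      exact pv_go_marks g hgood fuel _ (hgood x) _ hlen1 hcnt1 y hy
    · have hxold1 : pvG (PySem.List.pySetD visit u true) x = false := by
        rw [pvG_set_ne visit u x true hu.1 hxR.1 hxu]; exact hxold
      exact pv_go_closednew E hER fuel _ (fun v vis => pv_dfs_length g fuel v vis)
        (fun v vis hl hv => pv_dfs_mono g hgood fuel v vis hl hv)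
        (fun v vis hl hv hvf hc => ih v vis hl hv hvf hc)
        _ (hgood u) _ hlen1 hcnt1 x hxR hresx hxold1 y hrel

theorem pv_dfs_reach (g : PySem.Dict Int (List Int)) (E : List (Int × Int))
    (hadj : ∀ a b, b ∈ g.getD a [] ↔ pvRel E a b) (hER : pvER E) (s : Int) (hs : pvInR s) :
    ∀ j, pvInR j →
      (pvG (pvDfs g 26 s (List.replicate 26 false)) j = true ↔ pvReach E s j) := by
  have hgood : ∀ a, ∀ v ∈ g.getD a [], pvInR v := by
    intro a v hv; exact (hER a v ((hadj a v).1 hv)).2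
  have h26 : (List.replicate 26 false : List Bool).length = 26 := by simp
  have hcnt : (List.replicate 26 false : List Bool).count false ≤ 26 := by simp
  intro j hj
  constructor
  · intro h
    rcases pv_dfs_sound g E hadj hER 26 s _ j h26 hs hj h with h1 | h1
    · rw [pvG_replicate] at h1; cases h1
    · exact h1
  · intro h
    induction h with
    | refl => exact pv_dfs_marks g hgood 26 s _ h26 hs (by norm_num)
    | tail hab hbc ih =>
      rename_i b c
      have hbR : pvInR b := (hER b c hbc).1
      have hb : pvG (pvDfs g 26 s (List.replicate 26 false)) b = true := ih hbR
      exact pv_dfs_closednew g E hadj hER 26 s _ h26 hs (pvG_replicate s) hcnt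
        b hbR hb (pvG_replicate b) c hbc

-- ---------- B side: relaxation lemmas ----------

theorem pv_relax_length (r : List Bool) (e : Int × Int) : (pvRelax r e).length = r.length := by
  unfold pvRelax; split <;> simp [PySem.List.length_pySetD]

theorem pv_fold_relax_length (E : List (Int × Int)) :
    ∀ r, (E.foldl pvRelax r).length = r.length := by
  induction E with
  | nil => intro r; rfl
  | cons e rest ih =>
    intro r
    show (rest.foldl pvRelax (pvRelax r e)).length = _
    rw [ih, pv_relax_length]

theorem pv_relax_mono (r : List Bool) (e : Int × Int) (h26 : r.length = 26)
    (he : pvInR e.2) : pvMono r (pvRelax r e) := by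
  unfold pvRelax
  split
  · exact pvMono_set_true r e.2 h26 he
  · exact pvMono_refl r

theorem pv_fold_relax_mono (E : List (Int × Int)) (hE : ∀ e ∈ E, pvInR e.2) :
    ∀ r, r.length = 26 → pvMono r (E.foldl pvRelax r) := by
  induction E with
  | nil => intro r _; exact pvMono_refl r
  | cons e rest ih =>
    intro r h26
    show pvMono r (rest.foldl pvRelax (pvRelax r e))
    refine pvMono_trans (pv_relax_mono r e h26 (hE e (by simp))) ?_
    exact ih (fun a ha => hE a (by simp [ha])) (pvRelax r e) (by rw [pv_relax_length]; exact h26)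

theorem pv_fold_relax_sound (E0 E : List (Int × Int)) (hER : pvER E0) (s : Int)
    (hsub : ∀ e ∈ E, e ∈ E0) :
    ∀ r, r.length = 26 → (∀ j, pvInR j → pvG r j = true → pvReach E0 s j) →
      ∀ j, pvInR j → pvG (E.foldl pvRelax r) j = true → pvReach E0 s j := by
  induction E with
  | nil => intro r _ hinv j hj h; exact hinv j hj h
  | cons e rest ih =>
    intro r h26 hinv j hj h
    have heE0 : e ∈ E0 := hsub e (by simp)
    have heR : pvInR e.1 ∧ pvInR e.2 := hER e.1 e.2 (by simpa [pvRel] using heE0)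
    refine ih (fun a ha => hsub a (by simp [ha])) (pvRelax r e)
      (by rw [pv_relax_length]; exact h26) ?_ j hj h
    intro j' hj' h'
    unfold pvRelax at h'
    split at h'
    · rename_i hcond
      by_cases hje : j' = e.2
      · subst hje
        have h1 : pvG r e.1 = true := by
          have := hcond
          simp only [Bool.and_eq_true] at this
          exact this.1
        exact Relation.ReflTransGen.tail (hinv e.1 heR.1 h1)
          (by simpa [pvRel] using heE0)
      · rw [pvG_set_ne r e.2 j' true heR.2.1 hj'.1 hje] at h'
        exact hinv j' hj' h'
    · exact hinv j' hj' h'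

theorem pv_fix_closed (E0 : List (Int × Int)) (hER : pvER E0) :
    ∀ (E : List (Int × Int)), (∀ e ∈ E, e ∈ E0) → ∀ (r r' : List Bool),
      r'.length = 26 → pvMono r r' → pvMono (E.foldl pvRelax r') r →
      pvClosedL E r := by
  intro E
  induction E with
  | nil => intro _ r r' _ _ _ e he; simp at he
  | cons e rest ih =>
    intro hsub r r' h26 hmono hback
    have heR : pvInR e.1 ∧ pvInR e.2 := hER e.1 e.2 (by
      have : e ∈ E0 := hsub e (by simp)
      simpa [pvRel] using this)
    have hrel26 : (pvRelax r' e).length = 26 := by rw [pv_relax_length]; exact h26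
    have hmonoRel : pvMono r' (pvRelax r' e) := pv_relax_mono r' e h26 heR.2
    have hback' : pvMono (rest.foldl pvRelax (pvRelax r' e)) r := hback
    have hge : pvMono (pvRelax r' e) (rest.foldl pvRelax (pvRelax r' e)) := by
      refine pv_fold_relax_mono rest ?_ (pvRelax r' e) hrel26
      intro a ha
      exact (hER a.1 a.2 (by
        have : a ∈ E0 := hsub a (by simp [ha])
        simpa [pvRel] using this)).2
    intro f hf h1
    rcases List.mem_cons.1 hf with hfe | hfr
    · subst hfe
      have h1' : pvG r' f.1 = true := hmono f.1 heR.1 h1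
      by_cases hfi : pvG r' f.2 = true
      · exact hback' f.2 heR.2 (hge f.2 heR.2 (hmonoRel f.2 heR.2 hfi))
      · have hcond : (PySem.List.pyGetD r' f.1 false && !PySem.List.pyGetD r' f.2 false) = true := by
          have : pvG r' f.2 = false := by simpa using hfi
          simp only [Bool.and_eq_true, Bool.not_eq_true']
          exact ⟨h1', this⟩
        have h2 : pvG (pvRelax r' f) f.2 = true := by
          unfold pvRelax
          rw [if_pos hcond]
          exact pvG_set_self r' f.2 true h26 heR.2
        exact hback' f.2 heR.2 (hge f.2 heR.2 h2)
    · exact ih (fun a ha => hsub a (by simp [ha])) r (pvRelax r' e) hrel26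
        (pvMono_trans hmono hmonoRel) hback' f hfr h1

theorem pv_pass_of_closed (E : List (Int × Int)) :
    ∀ r, pvClosedL E r → E.foldl pvRelax r = r := by
  induction E with
  | nil => intro r _; rfl
  | cons e rest ih =>
    intro r hcl
    show rest.foldl pvRelax (pvRelax r e) = r
    have hre : pvRelax r e = r := by
      unfold pvRelax
      split
      · rename_i hcond
        simp only [Bool.and_eq_true, Bool.not_eq_true'] at hcond
        have h2 := hcl e (by simp) hcond.1
        unfold pvG at h2
        rw [h2] at hcond
        exact absurd hcond.2 (by decide)
      · rfl
    rw [hre]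
    exact ih r (fun a ha => hcl a (by simp [ha]))

theorem pv_iter_of_closed (E0 : List (Int × Int)) (l : List Int) :
    ∀ r, pvClosedL E0 r → l.foldl (fun r _ => E0.foldl pvRelax r) r = r := by
  induction l with
  | nil => intro r _; rfl
  | cons x l' ih =>
    intro r hcl
    show l'.foldl _ (E0.foldl pvRelax r) = r
    rw [pv_pass_of_closed E0 r hcl]
    exact ih r hcl

theorem pv_iter_length (E0 : List (Int × Int)) (l : List Int) :
    ∀ r, (l.foldl (fun r _ => E0.foldl pvRelax r) r).length = r.length := by
  induction l with
  | nil => intro r; rfl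
  | cons x l' ih =>
    intro r
    show (l'.foldl _ (E0.foldl pvRelax r)).length = _
    rw [ih, pv_fold_relax_length]

theorem pv_iter_mono (E0 : List (Int × Int)) (hER : pvER E0) (l : List Int) :
    ∀ r, r.length = 26 → pvMono r (l.foldl (fun r _ => E0.foldl pvRelax r) r) := by
  induction l with
  | nil => intro r _; exact pvMono_refl r
  | cons x l' ih =>
    intro r h26
    show pvMono r (l'.foldl _ (E0.foldl pvRelax r))
    refine pvMono_trans (pv_fold_relax_mono E0 (fun e he => (hER e.1 e.2 (by simpa [pvRel] using he)).2) r h26) ?_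
    exact ih (E0.foldl pvRelax r) (by rw [pv_fold_relax_length]; exact h26)

theorem pv_iter_sound (E0 : List (Int × Int)) (hER : pvER E0) (s : Int) (l : List Int) :
    ∀ r, r.length = 26 → (∀ j, pvInR j → pvG r j = true → pvReach E0 s j) →
      ∀ j, pvInR j → pvG (l.foldl (fun r _ => E0.foldl pvRelax r) r) j = true →
        pvReach E0 s j := by
  induction l with
  | nil => intro r _ hinv j hj h; exact hinv j hj h
  | cons x l' ih =>
    intro r h26 hinv j hj h
    refine ih (E0.foldl pvRelax r) (by rw [pv_fold_relax_length]; exact h26) ?_ j hj h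
    exact pv_fold_relax_sound E0 E0 hER s (fun e he => he) r h26 hinv

theorem pv_iter_closed_or_count (E0 : List (Int × Int)) (hER : pvER E0) :
    ∀ (l : List Int) (r : List Bool), r.length = 26 →
      pvClosedL E0 (l.foldl (fun r _ => E0.foldl pvRelax r) r) ∨
        l.length + r.count true ≤ (l.foldl (fun r _ => E0.foldl pvRelax r) r).count true := by
  intro l
  induction l with
  | nil => intro r _; right; simp
  | cons x l' ih =>
    intro r h26
    by_cases hcl : pvClosedL E0 r
    · left
      show pvClosedL E0 (l'.foldl _ (E0.foldl pvRelax r))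
      rw [pv_pass_of_closed E0 r hcl, pv_iter_of_closed E0 l' r hcl]
      exact hcl
    · have hp26 : (E0.foldl pvRelax r).length = 26 := by
        rw [pv_fold_relax_length]; exact h26
      have hmono : pvMono r (E0.foldl pvRelax r) :=
        pv_fold_relax_mono E0 (fun e he => (hER e.1 e.2 (by simpa [pvRel] using he)).2) r h26
      have hnm : ¬ pvMono (E0.foldl pvRelax r) r := by
        intro hm
        exact hcl (pv_fix_closed E0 hER E0 (fun e he => he) r r h26 (pvMono_refl r) hm)
      have hstrict : r.count true < (E0.foldl pvRelax r).count true :=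
        pv_countTrue_strict r (E0.foldl pvRelax r) h26 hp26 hmono hnm
      rcases ih (E0.foldl pvRelax r) hp26 with hc | hcount
      · left; exact hc
      · right
        show l'.length + 1 + r.count true ≤
          (l'.foldl (fun r _ => E0.foldl pvRelax r) (E0.foldl pvRelax r)).count true
        omega

theorem pv_fix_reach (E : List (Int × Int)) (hER : pvER E) (s : Int) (hs : pvInR s) :
    ∀ j, pvInR j →
      (pvG ((PySem.List.pyRange 0 26 1).foldl (fun r _ => E.foldl pvRelax r)
          (PySem.List.pySetD (List.replicate 26 false) s true)) j = true ↔ pvReach E s j) := by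
  set r0 := PySem.List.pySetD (List.replicate 26 false) s true with hr0
  have h026 : (List.replicate 26 false : List Bool).length = 26 := by simp
  have hr026 : r0.length = 26 := by rw [hr0, PySem.List.length_pySetD]; simp
  have hr0s : pvG r0 s = true := by
    rw [hr0]; exact pvG_set_self _ s true h026 hs
  have hr0sound : ∀ j, pvInR j → pvG r0 j = true → pvReach E s j := by
    intro j hj h
    by_cases hjs : j = s
    · subst hjs; exact Relation.ReflTransGen.refl
    · rw [hr0, pvG_set_ne _ s j true hs.1 hj.1 hjs, pvG_replicate] at h
      cases h
  set res := (PySem.List.pyRange 0 26 1).foldl (fun r _ => E.foldl pvRelax r) r0 with hres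
  have hlenl : (PySem.List.pyRange 0 26 1).length = 26 := by
    rw [PySem.List.length_pyRange_one]; rfl
  have hres26 : res.length = 26 := by rw [hres, pv_iter_length]; exact hr026
  have hclosed : pvClosedL E res := by
    rcases pv_iter_closed_or_count E hER (PySem.List.pyRange 0 26 1) r0 hr026 with hc | hcount
    · exact hc
    · exfalso
      have h1 : 1 ≤ r0.count true := pv_countTrue_pos r0 s hr026 hs hr0s
      have h2 : res.count true ≤ 26 := by
        have := List.count_le_length (l := res) (a := true)
        omega
      rw [hlenl] at hcount
      rw [← hres] at hcount
      omega
  intro j hj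
  constructor
  · intro h
    exact pv_iter_sound E hER s (PySem.List.pyRange 0 26 1) r0 hr026 hr0sound j hj h
  · intro h
    induction h with
    | refl => exact pv_iter_mono E hER (PySem.List.pyRange 0 26 1) r0 hr026 s hs hr0s
    | tail hab hbc ih =>
      rename_i b c
      have hbR : pvInR b := (hER b c hbc).1
      exact hclosed (b, c) hbc (ih hbR)

-- ---------- loop characterisation ----------

def pvMarkStep (m : List Bool) (s : String) : List Bool :=
  PySem.List.pySetD (PySem.List.pySetD m (pvIdxF s) true) (pvIdxL s) true
def pvInStep (d : List Int) (s : String) : List Int :=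
  PySem.List.pySetD d (pvIdxL s) (PySem.List.pyGetD d (pvIdxL s) 0 + 1)
def pvOutStep (d : List Int) (s : String) : List Int :=
  PySem.List.pySetD d (pvIdxF s) (PySem.List.pyGetD d (pvIdxF s) 0 + 1)
def pvDegStep (d : List Int) (s : String) : List Int :=
  let d1 := PySem.List.pySetD d (pvIdxL s) (PySem.List.pyGetD d (pvIdxL s) 0 + 1)
  PySem.List.pySetD d1 (pvIdxF s) (PySem.List.pyGetD d1 (pvIdxF s) 0 - 1)
def pvGStep (g : PySem.Dict Int (List Int)) (s : String) : PySem.Dict Int (List Int) :=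
  (if g.contains (pvIdxF s) then g else g.insert (pvIdxF s) []).modify (pvIdxF s) []
    (fun xs => xs ++ [pvIdxL s])
def pvEdges (ss : List String) : List (Int × Int) := ss.map (fun s => (pvIdxF s, pvIdxL s))

theorem pv_fold_range_take {β : Type} (arr : List String) (N : Int) (f : β → String → β)
    (init : β) (h1 : 0 ≤ N) (h2 : N ≤ arr.length) :
    (PySem.List.pyRange 0 N 1).foldl (fun st i => f st (PySem.List.pyGetD arr i "")) init
      = (arr.take N.toNat).foldl f init := by
  have hn : (arr.take N.toNat).length = N.toNat := by
    rw [List.length_take]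
    have : N.toNat ≤ arr.length := Int.toNat_le.2 h2
    omega
  have hbase := PySem.List.foldl_pyRange_zero_pyGetD' (arr.take N.toNat) "" f init
  rw [hn, Int.toNat_of_nonneg h1] at hbase
  rw [← hbase]
  apply PySem.List.foldl_congr_mem
  intro acc i hi
  have hmem := PySem.List.mem_pyRange_one.1 hi
  congr 1
  rw [PySem.List.pyGetD_of_nonneg _ _ hmem.1, PySem.List.pyGetD_of_nonneg _ _ hmem.1]
  rw [List.getD_eq_getElem?_getD, List.getD_eq_getElem?_getD, List.getElem?_take]
  rw [if_pos (by omega)]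

theorem pv_foldA_proj : ∀ (ss : List String) (st : PySem.Dict Int (List Int) × List Bool × List Int × List Int),
    ss.foldl pvStepA st
      = (ss.foldl pvGStep st.1, ss.foldl pvMarkStep st.2.1,
         ss.foldl pvInStep st.2.2.1, ss.foldl pvOutStep st.2.2.2) := by
  intro ss
  induction ss with
  | nil => intro st; rfl
  | cons x ss ih =>
    intro st
    show ss.foldl pvStepA (pvStepA st x) = _
    rw [ih (pvStepA st x)]
    rfl

theorem pv_foldB_proj : ∀ (ss : List String) (st : List (Int × Int) × List Bool × List Int),
    ss.foldl pvStepB st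
      = (st.1 ++ pvEdges ss, ss.foldl pvMarkStep st.2.1, ss.foldl pvDegStep st.2.2) := by
  intro ss
  induction ss with
  | nil => intro st; simp [pvEdges]
  | cons x ss ih =>
    intro st
    show ss.foldl pvStepB (pvStepB st x) = _
    rw [ih (pvStepB st x)]
    simp only [Prod.mk.injEq]
    refine ⟨?_, rfl, rfl⟩
    show (st.1 ++ [(pvIdxF x, pvIdxL x)]) ++ pvEdges ss = st.1 ++ pvEdges (x :: ss)
    rw [List.append_assoc]
    rfl

theorem pv_getD_pySetD (d : List Int) (i : Int) (v : Int) (k : Nat) (hi : pvInR i)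
    (hlen : d.length = 26) (hk : k < 26) :
    (PySem.List.pySetD d i v).getD k 0 = if k = i.toNat then v else d.getD k 0 := by
  rw [PySem.List.pySetD_of_nonneg _ _ hi.1]
  have hidx : i.toNat < d.length := by rw [hlen]; exact (Int.toNat_lt' (by norm_num)).2 hi.2
  by_cases hki : k = i.toNat
  · subst hki
    rw [if_pos rfl, List.getD_eq_getElem?_getD, List.getElem?_set_self hidx]
    rfl
  · rw [if_neg hki, List.getD_eq_getElem?_getD, List.getElem?_set_ne (fun h => hki h.symm),
      ← List.getD_eq_getElem?_getD]

theorem pv_deg_inv : ∀ (ss : List String), (∀ s ∈ ss, pvInR (pvIdxF s) ∧ pvInR (pvIdxL s)) →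
    ∀ (dI dO dD : List Int), dI.length = 26 → dO.length = 26 → dD.length = 26 →
    (∀ k, k < 26 → dI.getD k 0 - dO.getD k 0 = dD.getD k 0) →
    (ss.foldl pvInStep dI).length = 26 ∧ (ss.foldl pvOutStep dO).length = 26 ∧
    (ss.foldl pvDegStep dD).length = 26 ∧
    (∀ k, k < 26 → (ss.foldl pvInStep dI).getD k 0 - (ss.foldl pvOutStep dO).getD k 0
        = (ss.foldl pvDegStep dD).getD k 0) := by
  intro ss
  induction ss with
  | nil =>
    intro _ dI dO dD h1 h2 h3 h4
    exact ⟨h1, h2, h3, h4⟩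
  | cons x ss ih =>
    intro hg dI dO dD h1 h2 h3 h4
    obtain ⟨hf, hl⟩ := hg x (by simp)
    have hgl : PySem.List.pyGetD dI (pvIdxL x) 0 = dI.getD (pvIdxL x).toNat 0 :=
      PySem.List.pyGetD_of_nonneg _ _ hl.1
    have hgf : PySem.List.pyGetD dO (pvIdxF x) 0 = dO.getD (pvIdxF x).toNat 0 :=
      PySem.List.pyGetD_of_nonneg _ _ hf.1
    have hfn : (pvIdxF x).toNat < 26 := (Int.toNat_lt' (by norm_num)).2 hf.2
    have hln : (pvIdxL x).toNat < 26 := (Int.toNat_lt' (by norm_num)).2 hl.2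
    have hd1len : (PySem.List.pySetD dD (pvIdxL x) (PySem.List.pyGetD dD (pvIdxL x) 0 + 1)).length = 26 := by
      rw [PySem.List.length_pySetD]; exact h3
    refine ih (fun a ha => hg a (by simp [ha])) _ _ _
      (by rw [pvInStep, PySem.List.length_pySetD]; exact h1)
      (by rw [pvOutStep, PySem.List.length_pySetD]; exact h2)
      (by rw [pvDegStep, PySem.List.length_pySetD, PySem.List.length_pySetD]; exact h3)
      ?_
    intro k hk
    rw [pvInStep, pvOutStep, pvDegStep]
    rw [hgl, hgf]
    rw [pv_getD_pySetD dI _ _ k hl h1 hk, pv_getD_pySetD dO _ _ k hf h2 hk]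
    rw [pv_getD_pySetD _ _ _ k hf hd1len hk]
    rw [PySem.List.pyGetD_of_nonneg _ _ hl.1, PySem.List.pyGetD_of_nonneg _ _ hf.1]
    rw [pv_getD_pySetD dD _ _ ((pvIdxF x).toNat) hl h3 hfn]
    rw [pv_getD_pySetD dD _ _ k hl h3 hk]
    have e1 := h4 k hk
    have e2 := h4 (pvIdxL x).toNat hln
    have e3 := h4 (pvIdxF x).toNat hfn
    by_cases hkl : k = (pvIdxL x).toNat <;> by_cases hkf : k = (pvIdxF x).toNat <;>
      by_cases hfl : (pvIdxF x).toNat = (pvIdxL x).toNat <;>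
      simp only [hkl, hkf, hfl, if_pos, if_neg, if_true, if_false] <;>
      first
      | omega
      | (split_ifs <;> omega)

theorem pv_g_adj : ∀ (ss : List String) (g : PySem.Dict Int (List Int)) (E0 : List (Int × Int)),
    (∀ a b : Int, b ∈ g.getD a [] ↔ (a, b) ∈ E0) →
    ∀ a b : Int, b ∈ (ss.foldl pvGStep g).getD a [] ↔ (a, b) ∈ E0 ++ pvEdges ss := by
  intro ss
  induction ss with
  | nil =>
    intro g E0 hinv a b
    simpa [pvEdges] using hinv a b
  | cons x ss ih =>
    intro g E0 hinv a b
    have hinv' : ∀ a b : Int, b ∈ (pvGStep g x).getD a []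
        ↔ (a, b) ∈ E0 ++ [(pvIdxF x, pvIdxL x)] := by
      intro a b
      have h1 : ∀ c : Int,
          (if g.contains (pvIdxF x) then g else g.insert (pvIdxF x) []).getD c [] = g.getD c [] := by
        intro c
        split
        · rfl
        · rename_i hnc
          rw [PySem.Dict.getD_insert]
          by_cases hcf : c = pvIdxF x
          · subst hcf
            rw [if_pos rfl, PySem.Dict.getD_of_not_contains g [] (by simpa using hnc)]
          · rw [if_neg hcf]
      rw [pvGStep, PySem.Dict.getD_modify]
      by_cases haf : a = pvIdxF x
      · subst haf
        rw [if_pos rfl, h1]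
        simp only [List.mem_append, List.mem_singleton, List.mem_append]
        rw [hinv]
        simp
      · rw [if_neg haf, h1]
        rw [hinv]
        simp [haf]
    have h2 := ih (pvGStep g x) (E0 ++ [(pvIdxF x, pvIdxL x)]) hinv' a b
    rw [List.append_assoc] at h2
    exact h2

theorem pv_idxF_inR (s : String) (hne : s.toList ≠ [])
    (h : pvLowerC ((s.toList[0]?).getD ' ')) : pvInR (pvIdxF s) := by
  have he : PySem.Str.pyGet? s 0 = s.toList[0]? := by
    simp [PySem.Str.pyGet?, PySem.List.pyGet?_zero]
  rw [pvIdxF, he]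
  obtain ⟨h1, h2⟩ := h
  constructor <;> omega

theorem pv_idxL_inR (s : String) (hne : s.toList ≠ [])
    (h : pvLowerC ((s.toList.getLast?).getD ' ')) : pvInR (pvIdxL s) := by
  have he : PySem.Str.pyGet? s (-1) = s.toList.getLast? := by
    simp [PySem.Str.pyGet?, PySem.List.pyGet?_neg_one]
  rw [pvIdxL, he]
  obtain ⟨h1, h2⟩ := h
  constructor <;> omega

theorem pv_main (arr : List String) (N : Int)
    (hpre : Pre_possibleOrderAmongString arr N) :
    possibleOrderAmongString arr N = possibleOrderAmongString_alt arr N := by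
  obtain ⟨hN1, hN2, hss⟩ := hpre
  have h0N : (0:Int) ≤ N := by omega
  have hA := pv_fold_range_take arr N pvStepA
    (PySem.Dict.empty, List.replicate 26 false, List.replicate 26 (0:Int), List.replicate 26 (0:Int)) h0N hN2
  have hB := pv_fold_range_take arr N pvStepB
    ([], List.replicate 26 false, List.replicate 26 (0:Int)) h0N hN2
  simp only [possibleOrderAmongString, possibleOrderAmongString_alt]
  rw [hA, hB, pv_foldA_proj, pv_foldB_proj]
  dsimp only
  rw [List.nil_append]
  -- abbreviations
  set ss := arr.take N.toNat with hssdef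
  set E := pvEdges ss with hE
  set m := ss.foldl pvMarkStep (List.replicate 26 false) with hm
  set InL := ss.foldl pvInStep (List.replicate 26 (0:Int)) with hIn
  set OutL := ss.foldl pvOutStep (List.replicate 26 (0:Int)) with hOut
  set Deg := ss.foldl pvDegStep (List.replicate 26 (0:Int)) with hDeg
  set gF := ss.foldl pvGStep PySem.Dict.empty with hgF
  have hssR : ∀ s ∈ ss, pvInR (pvIdxF s) ∧ pvInR (pvIdxL s) := by
    intro s hsmem
    obtain ⟨hne, hlo, hhi⟩ := hss s hsmem
    exact ⟨pv_idxF_inR s hne hlo, pv_idxL_inR s hne hhi⟩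
  have hER : pvER E := by
    intro a b hab
    rw [hE, pvRel] at hab
    obtain ⟨s, hsmem, heq⟩ := List.mem_map.1 hab
    obtain ⟨h1, h2⟩ := Prod.mk.injEq _ _ _ _ ▸ heq
    rw [← h1, ← h2]
    exact hssR s hsmem
  have hdeg := pv_deg_inv ss hssR (List.replicate 26 (0:Int)) (List.replicate 26 (0:Int))
    (List.replicate 26 (0:Int)) (by simp) (by simp) (by simp)
    (by intro k hk; rw [List.getD_replicate _ hk]; omega)
  obtain ⟨hInlen, hOutlen, hDeglen, hpt⟩ := hdeg
  rw [← hIn] at hInlen hpt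
  rw [← hOut] at hOutlen hpt
  rw [← hDeg] at hDeglen hpt
  -- the two balance tests are equivalent
  have hAall : ((PySem.List.pyRange 0 26 1).all
      (fun i => PySem.List.pyGetD InL i 0 == PySem.List.pyGetD OutL i 0) = true)
      ↔ ∀ k, k < 26 → InL.getD k 0 = OutL.getD k 0 := by
    rw [List.all_eq_true]
    constructor
    · intro h k hk
      have := h (k : Int) (PySem.List.mem_pyRange_one.2 ⟨by positivity, by exact_mod_cast hk⟩)
      simpa [PySem.List.pyGetD_natCast] using this
    · intro h i hi
      obtain ⟨hi0, hi26⟩ := PySem.List.mem_pyRange_one.1 hi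
      rw [← Int.toNat_of_nonneg hi0]
      simp only [PySem.List.pyGetD_natCast, beq_iff_eq]
      exact h i.toNat (by omega)
  have hBany : ((Deg.any fun x => x != 0) = false) ↔ ∀ k, k < 26 → Deg.getD k 0 = 0 := by
    rw [List.any_eq_false]
    constructor
    · intro h k hk
      have hkl : k < Deg.length := by rw [hDeglen]; exact hk
      have := h Deg[k] (List.getElem_mem hkl)
      rw [List.getD_eq_getElem _ _ hkl]
      simpa using this
    · intro h x hx
      obtain ⟨k, hkl, he⟩ := List.mem_iff_getElem.1 hx
      have hk26 : k < 26 := by rw [hDeglen] at hkl; exact hkl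
      have := h k hk26
      rw [List.getD_eq_getElem _ _ hkl, he] at this
      simp [this]
  have hcond : ((PySem.List.pyRange 0 26 1).all
      (fun i => PySem.List.pyGetD InL i 0 == PySem.List.pyGetD OutL i 0) = true)
      ↔ ((Deg.any fun x => x != 0) = false) := by
    rw [hAall, hBany]
    constructor
    · intro h k hk; have := hpt k hk; have := h k hk; omega
    · intro h k hk; have := hpt k hk; have := h k hk; omega
  by_cases hc : (PySem.List.pyRange 0 26 1).all
      (fun i => PySem.List.pyGetD InL i 0 == PySem.List.pyGetD OutL i 0) = true
  · rw [if_pos hc]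
    have hcB := hcond.1 hc
    rw [hcB]
    rw [if_neg (by simp)]
    -- connectivity branch
    have hadjE : ∀ a b : Int, b ∈ gF.getD a [] ↔ pvRel E a b := by
      intro a b
      have := pv_g_adj ss PySem.Dict.empty []
        (by intro a b; simp [PySem.Dict.getD_empty]) a b
      rw [List.nil_append] at this
      exact this
    have hlarr : 0 < arr.length := by omega
    have hsslen : ss.length = N.toNat := by
      rw [hssdef, List.length_take]
      have := Int.toNat_le.2 hN2
      omega
    have h0 : PySem.List.pyGetD arr 0 "" = arr[0] := by
      rw [PySem.List.pyGetD_of_nonneg _ _ (le_refl 0)]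
      show arr.getD (0:Int).toNat "" = arr[0]
      rw [show (0:Int).toNat = 0 from rfl, List.getD_eq_getElem _ _ hlarr]
    have hmem0 : PySem.List.pyGetD arr 0 "" ∈ ss := by
      rw [h0]
      have hlt : 0 < ss.length := by rw [hsslen]; omega
      exact List.mem_iff_getElem.2 ⟨0, hlt, List.getElem_take⟩
    set s0 := pvIdxF (PySem.List.pyGetD arr 0 "") with hs0def
    have hs0 : pvInR s0 := (hssR _ hmem0).1
    have hss0q : ss[0]? = some (PySem.List.pyGetD arr 0 "") := by
      rw [h0]
      show (List.take N.toNat arr)[0]? = some arr[0]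
      rw [List.getElem?_take, if_pos (by omega), List.getElem?_eq_getElem hlarr]
    have hE0 : PySem.List.pyGetD E 0 ((0:Int), (0:Int))
        = (s0, pvIdxL (PySem.List.pyGetD arr 0 "")) := by
      rw [PySem.List.pyGetD_of_nonneg _ _ (le_refl 0)]
      show (pvEdges ss).getD (0:Int).toNat ((0:Int), (0:Int)) = _
      rw [show (0:Int).toNat = 0 from rfl, List.getD_eq_getElem?_getD]
      simp only [pvEdges, List.getElem?_map, hss0q]
      rfl
    rw [hE0]
    have hvis := pv_dfs_reach gF E hadjE hER s0 hs0
    have hreach := pv_fix_reach E hER s0 hs0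
    simp only [pvIsConnected]
    apply pv_all_congr_mem
    intro i hi
    obtain ⟨hi0, hi26⟩ := PySem.List.mem_pyRange_one.1 hi
    have hiR : pvInR i := ⟨hi0, hi26⟩
    have hv : pvG (pvDfs gF 26 s0 (List.replicate 26 false)) i
        = pvG ((PySem.List.pyRange 0 26 1).foldl (fun r _ => E.foldl pvRelax r)
            (PySem.List.pySetD (List.replicate 26 false) s0 true)) i := by
      rw [Bool.eq_iff_iff, hvis i hiR, hreach i hiR]
    simp only [pvG] at hv
    rw [hv]
    cases PySem.List.pyGetD m i false <;>
      cases PySem.List.pyGetD ((PySem.List.pyRange 0 26 1).foldl (fun r _ => E.foldl pvRelax r)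
        (PySem.List.pySetD (List.replicate 26 false) s0 true)) i false <;> rfl
  · rw [if_neg hc]
    have hcB : (Deg.any fun x => x != 0) = true := by
      cases h : (Deg.any fun x => x != 0)
      · exact absurd (hcond.2 h) hc
      · rfl
    rw [hcB]
    simp

-- ===== VERDICT (by name: the statement is the Claim_ definition above) =====
theorem possibleOrderAmongString_spec : Claim_equal_possibleOrderAmongString := by
  intro arr N _ hpre
  exact pv_main arr N hpre
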